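-- pv_equiv track=rewrite | github.com/daniellozuz/Project-Euler | Problem98/problem98.py | make_associations
-- ===== SOURCE A (Python) =====
-- def make_associations(letters, firsts, forbidden):
--     '''Returns a list of possible associations of numbers with letters (dictionaries)'''
--     enums = []
--     if len(letters) == 1:
--         return [{letters[0] : n} for n in range(10) if n not in forbidden and not (n == 0 and (letters[0] in firsts))]
--     else:
--         for n in range(10):
--             if n not in forbidden and not (n == 0 and (letters[0] in firsts)):
--                 for ele in make_associations(letters[1:], firsts, forbidden + [n]):
--                     if ele != None:
--                         enums.append(dict(list({letters[0] : n}.items()) + list(ele.items())))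
--         return enums
-- ===== SOURCE B (Python) =====
-- from itertools import permutations
--
--
-- def make_associations(letters, firsts, forbidden):
--     '''Returns a list of possible associations of numbers with letters (dictionaries)'''
--     available = [n for n in range(10) if n not in forbidden]
--     zero_banned = [letter in firsts for letter in letters]
--     result = []
--     for perm in permutations(available, len(letters)):
--         if not any(d == 0 and banned for d, banned in zip(perm, zero_banned)):
--             result.append(dict(zip(letters, perm)))
--     return result
-- ===== Notes on version B (the rewrite author's own statement) =====
-- stated objective: idiomatic
-- what changed: B replaces A's recursive enumeration with accumulating forbidden lists and per-level dict merging by a single pass over itertools.permutations of the available digits, filtering leading-zero violations and building each dict once with dict(zip(letters, perm)).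
-- outside the precondition, e.g. on make_associations([], [], [0]): A returns [], B returns [{}]
import Mathlib
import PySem

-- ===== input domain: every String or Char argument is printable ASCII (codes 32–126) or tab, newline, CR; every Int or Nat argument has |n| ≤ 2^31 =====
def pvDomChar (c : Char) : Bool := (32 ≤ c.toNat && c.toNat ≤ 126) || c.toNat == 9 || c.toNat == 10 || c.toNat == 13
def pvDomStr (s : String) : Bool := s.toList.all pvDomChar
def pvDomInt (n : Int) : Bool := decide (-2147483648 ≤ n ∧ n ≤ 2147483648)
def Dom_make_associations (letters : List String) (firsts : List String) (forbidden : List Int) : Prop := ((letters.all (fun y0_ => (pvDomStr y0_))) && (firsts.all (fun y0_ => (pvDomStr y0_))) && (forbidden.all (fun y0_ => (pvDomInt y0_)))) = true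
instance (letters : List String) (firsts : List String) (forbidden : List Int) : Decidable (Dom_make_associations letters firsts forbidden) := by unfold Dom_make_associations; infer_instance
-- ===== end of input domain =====

-- B enumerates itertools.permutations of the available digits instead of A's recursive
-- descent with a growing forbidden list; same values, same order, built more idiomatically.


-- ===== PORT A =====
-- A's dictionaries are PySem.Dict values; the recursion returns dicts, the wrapper
-- returns their item lists.  Python's `if ele != None` is always true (the recursion
-- only ever yields dicts), so the append is unconditional.
def make_associations_rec (letters : List String) (firsts : List String) (forbidden : List Int) :
    List (PySem.Dict String Int) :=
  match letters with
  | [] => []   -- Python raises IndexError here (or degenerates); empty letters is excluded by Pre_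
  | [l0] =>
      ((PySem.List.pyRange 0 10 1).filter
          (fun n => !forbidden.contains n && !(n == 0 && firsts.contains l0))).map
        (fun n => PySem.Dict.ofList [(l0, n)])
  | l0 :: l1 :: rest =>
      (PySem.List.pyRange 0 10 1).foldl
        (fun enums n =>
          if !forbidden.contains n && !(n == 0 && firsts.contains l0) then
            (make_associations_rec (l1 :: rest) firsts (forbidden ++ [n])).foldl
              (fun enums ele =>
                enums ++ [PySem.Dict.ofList ((PySem.Dict.ofList [(l0, n)]).items ++ ele.items)])
              enums
          else enums)
        []

def make_associations (letters : List String) (firsts : List String) (forbidden : List Int) :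
    List (List (String × Int)) :=
  (make_associations_rec letters firsts forbidden).map (fun d => d.items)

-- ===== PORT B =====
def make_associations_alt (letters : List String) (firsts : List String) (forbidden : List Int) :
    List (List (String × Int)) :=
  let available := (PySem.List.pyRange 0 10 1).filter (fun n => !forbidden.contains n)
  let zeroBanned := letters.map (fun l => firsts.contains l)
  ((PySem.List.permutations available letters.length).filter
      (fun perm => !(perm.zip zeroBanned).any (fun p => p.1 == 0 && p.2))).map
    (fun perm => (PySem.Dict.ofList (letters.zip perm)).items)

-- ===== PRECONDITION & SPEC =====
-- Pre_ excludes only empty letters, where A raises IndexError (letters[0]) unless 0 is in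
-- forbidden, and where 0 ∈ forbidden makes A's degenerate recursion return []; B returns [{}].
def Pre_make_associations (letters : List String) (firsts : List String) (forbidden : List Int) : Prop :=
  letters ≠ []
instance (letters : List String) (firsts : List String) (forbidden : List Int) :
    Decidable (Pre_make_associations letters firsts forbidden) := by
  unfold Pre_make_associations; infer_instance

def pvWitness_make_associations : List String × List String × List Int := (["a", "b"], ["a"], [3])

def Spec_make_associations (letters : List String) (firsts : List String) (forbidden : List Int)
    (out : List (List (String × Int))) : Prop :=
  out = make_associations_alt letters firsts forbidden
instance (letters : List String) (firsts : List String) (forbidden : List Int)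
    (out : List (List (String × Int))) : Decidable (Spec_make_associations letters firsts forbidden out) := by
  unfold Spec_make_associations; infer_instance

-- ===== CLAIM (what is proved, stated in full; the proofs are below) =====
def Claim_equal_make_associations : Prop :=
  ∀ (letters : List String) (firsts : List String) (forbidden : List Int),
    Dom_make_associations letters firsts forbidden →
    Pre_make_associations letters firsts forbidden →
    Spec_make_associations letters firsts forbidden (make_associations letters firsts forbidden)

-- ===== LEMMAS AND PROOFS =====

-- generic list-shape lemmas ---------------------------------------------------

theorem pv_flatMap_congr_mem {α β : Type} (l : List α) (f g : α → List β)
    (h : ∀ x ∈ l, f x = g x) : l.flatMap f = l.flatMap g := by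
  induction l with
  | nil => rfl
  | cons x t ih =>
      simp only [List.flatMap_cons]
      rw [h x (by simp), ih (fun y hy => h y (by simp [hy]))]

theorem pv_foldl_if_append {α β : Type} (p : α → Bool) (F : α → List β)
    (l : List α) (acc : List β) :
    l.foldl (fun acc x => if p x then acc ++ F x else acc) acc
      = acc ++ (l.filter p).flatMap F := by
  induction l generalizing acc with
  | nil => simp
  | cons x t ih =>
      cases hx : p x <;>
        simp [List.foldl_cons, List.filter_cons, hx, ih, List.append_assoc]

theorem pv_foldl_if_append' {α β : Type} (p : α → Bool) (G : List β → α → List β)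
    (F : α → List β) (l : List α) (acc : List β) (hG : ∀ acc x, G acc x = acc ++ F x) :
    l.foldl (fun acc x => if p x then G acc x else acc) acc
      = acc ++ (l.filter p).flatMap F := by
  have hfun : (fun (acc : List β) (x : α) => if p x then G acc x else acc)
      = (fun acc x => if p x then acc ++ F x else acc) := by
    funext acc x
    by_cases hx : p x = true <;> simp [hx, hG]
  rw [hfun, pv_foldl_if_append]

theorem pv_flatMap_if_filter {α β : Type} (p : α → Bool) (F : α → List β) (l : List α) :
    l.flatMap (fun x => if p x then F x else []) = (l.filter p).flatMap F := by
  induction l with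
  | nil => rfl
  | cons x t ih =>
      simp only [List.flatMap_cons, List.filter_cons]
      by_cases hx : p x = true
      · simp [hx, ih]
      · simp [Bool.eq_false_iff.mpr hx, ih]

theorem pv_filter_flatMap {α β : Type} (p : β → Bool) (f : α → List β) (l : List α) :
    (l.flatMap f).filter p = l.flatMap (fun x => (f x).filter p) := by
  induction l with
  | nil => rfl
  | cons x t ih => simp [List.flatMap_cons, List.filter_append, ih]

theorem pv_map_flatMap {α β γ : Type} (g : β → γ) (f : α → List β) (l : List α) :
    (l.flatMap f).map g = l.flatMap (fun x => (f x).map g) := by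
  induction l with
  | nil => rfl
  | cons x t ih => simp [List.flatMap_cons, ih]

theorem pv_flatMap_single {α β : Type} (f : α → β) (l : List α) :
    l.flatMap (fun x => [f x]) = l.map f := by
  induction l with
  | nil => rfl
  | cons x t ih => simp [List.flatMap_cons, ih]

-- dict lemmas: dict(list(d1.items()) + list(d2.items())) built from raw pairs ---

def pvLastD (l : List (String × Int)) (j : String) (dflt : Int) : Int :=
  l.foldl (fun acc p => if p.1 == j then p.2 else acc) dflt

theorem pv_lastD_cons (k : String) (v : Int) (t : List (String × Int)) (j : String) (dflt : Int) :
    pvLastD ((k, v) :: t) j dflt = pvLastD t j (if k == j then v else dflt) := rfl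

theorem pv_lastD_not_mem : ∀ (l : List (String × Int)) (j : String) (dflt : Int),
    j ∉ l.map Prod.fst → pvLastD l j dflt = dflt
  | [], _, _, _ => rfl
  | (k, v) :: t, j, dflt, h => by
      rw [pv_lastD_cons]
      have hk : (k == j) = false := by
        have : k ≠ j := fun he => h (by simp [he])
        simp [this]
      rw [hk]
      simp only [Bool.false_eq_true, if_false]
      exact pv_lastD_not_mem t j dflt (fun hm => h (by simp [hm]))

theorem pv_lastD_nodup : ∀ (l : List (String × Int)) (j : String) (dflt : Int),
    (l.map Prod.fst).Nodup →
    pvLastD l j dflt = (((PySem.Dict.mk l : PySem.Dict String Int).get? j).getD dflt)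
  | [], _, _, _ => rfl
  | (k, v) :: t, j, dflt, hnd => by
      have hk : k ∉ t.map Prod.fst := (List.nodup_cons.mp (by simpa using hnd)).1
      have hndt : (t.map Prod.fst).Nodup := (List.nodup_cons.mp (by simpa using hnd)).2
      rw [pv_lastD_cons, PySem.Dict.get?_mk_cons]
      by_cases h : (k == j) = true
      · have hj : k = j := by simpa using h
        rw [h]
        simp only [if_true]
        subst hj
        exact pv_lastD_not_mem t k v hk
      · have h' : (k == j) = false := Bool.eq_false_iff.mpr h
        rw [h']
        simp only [Bool.false_eq_true, if_false]
        exact pv_lastD_nodup t j dflt hndt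

theorem pv_lastD_items (d : PySem.Dict String Int) (hnd : d.keys.Nodup) (j : String) (dflt : Int) :
    pvLastD d.items j dflt = d.getD j dflt := by
  obtain ⟨l⟩ := d
  rw [PySem.Dict.getD_eq_get?_getD]
  exact pv_lastD_nodup l j dflt (by simpa [PySem.Dict.keys] using hnd)

theorem pv_getD_update (l : List (String × Int)) (d : PySem.Dict String Int) (j : String) (v0 : Int) :
    (d.update l).getD j v0 = pvLastD l j (d.getD j v0) := by
  induction l generalizing d with
  | nil => rfl
  | cons p t ih =>
      show ((d.insert p.1 p.2).update t).getD j v0 = _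
      rw [ih]
      have : (d.insert p.1 p.2).getD j v0 = if p.1 == j then p.2 else d.getD j v0 := by
        rw [PySem.Dict.getD_insert]
        by_cases h : j = p.1 <;> simp [h]
        intro h'; exact absurd h'.symm h
      simp [pvLastD, this]

theorem pv_keys_update (l : List (String × Int)) (d : PySem.Dict String Int) :
    (d.update l).keys = PySem.Set.update d.keys (l.map Prod.fst) := by
  simpa using PySem.Dict.keys_foldl_insert_key l Prod.fst (fun _ p => p.2) d

theorem pv_nodup_keys_update (l : List (String × Int)) (d : PySem.Dict String Int)
    (h : d.keys.Nodup) : (d.update l).keys.Nodup := by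
  simpa using PySem.Dict.nodup_keys_foldl_insert_key l Prod.fst (fun _ p => p.2) d h

theorem pv_set_update_ofList {α : Type} [BEq α] [LawfulBEq α] (s : PySem.Set α) (xs : List α) :
    PySem.Set.update s (PySem.Set.ofList xs) = PySem.Set.update s xs := by
  rw [PySem.Set.update_eq_append_filter, PySem.Set.update_eq_append_filter,
      PySem.Set.ofList_ofList]

theorem pv_update_ofList_items (d : PySem.Dict String Int) (hnd : d.keys.Nodup)
    (zs : List (String × Int)) :
    d.update (PySem.Dict.ofList zs).items = d.update zs := by
  have hkeys : (d.update (PySem.Dict.ofList zs).items).keys = (d.update zs).keys := by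
    rw [pv_keys_update, pv_keys_update]
    have h1 : (PySem.Dict.ofList zs).items.map Prod.fst = (PySem.Dict.ofList zs).keys := rfl
    have h2 : (PySem.Dict.ofList zs).keys = PySem.Set.ofList (zs.map Prod.fst) := by
      show (PySem.Dict.empty.update zs).keys = _
      rw [pv_keys_update, show PySem.Dict.empty.keys = ([] : List String) from rfl,
          PySem.Set.update_nil_left]
    rw [h1, h2, pv_set_update_ofList]
  have hgetD : ∀ j : String,
      (d.update (PySem.Dict.ofList zs).items).getD j 0 = (d.update zs).getD j 0 := by
    intro j
    rw [pv_getD_update ((PySem.Dict.ofList zs).items) d j 0, pv_getD_update zs d j 0,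
        pv_lastD_items (PySem.Dict.ofList zs) (PySem.Dict.nodup_keys_ofList zs) j (d.getD j 0)]
    show (PySem.Dict.empty.update zs).getD j (d.getD j 0) = _
    rw [pv_getD_update]
    rfl
  apply PySem.Dict.ext
  rw [PySem.Dict.items_eq_map_keys _ (pv_nodup_keys_update _ _ hnd) 0,
      PySem.Dict.items_eq_map_keys _ (pv_nodup_keys_update _ _ hnd) 0, hkeys]
  exact List.map_congr_left (fun k _ => by rw [hgetD k])

theorem pv_dict_cons (k : String) (v : Int) (zs : List (String × Int)) :
    PySem.Dict.ofList ((k, v) :: (PySem.Dict.ofList zs).items)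
      = PySem.Dict.ofList ((k, v) :: zs) := by
  show (PySem.Dict.empty.insert k v).update (PySem.Dict.ofList zs).items
      = (PySem.Dict.empty.insert k v).update zs
  refine pv_update_ofList_items _ ?_ zs
  rw [show (PySem.Dict.empty.insert k v).keys = [k] from rfl]
  exact List.nodup_singleton k

-- permutations: indexed selection rewritten as element selection on a Nodup list ---

theorem pv_flatMapIdx {β : Type} :
    ∀ (xs : List Int) (h : Int → List Int → List β), xs.Nodup →
    (List.range xs.length).flatMap
        (fun i => match xs[i]? with | none => [] | some x => h x (xs.eraseIdx i))
      = xs.flatMap (fun x => h x (xs.filter (fun y => !(y == x)))) := by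
  intro xs
  induction xs with
  | nil => intro h _; rfl
  | cons x t ih =>
      intro h hnd
      have hx : x ∉ t := (List.nodup_cons.mp hnd).1
      have hndt : t.Nodup := (List.nodup_cons.mp hnd).2
      rw [List.length_cons, List.range_succ_eq_map, List.flatMap_cons, List.flatMap_map]
      have head : (match (x :: t)[0]? with
          | none => ([] : List β) | some y => h y ((x :: t).eraseIdx 0)) = h x t := rfl
      rw [head]
      have tail : (fun (a : Nat) => match (x :: t)[a.succ]? with
            | none => ([] : List β) | some y => h y ((x :: t).eraseIdx a.succ))
          = (fun (a : Nat) => match t[a]? with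
            | none => ([] : List β) | some y => (fun y r => h y (x :: r)) y (t.eraseIdx a)) := by
        funext a
        simp only [Nat.succ_eq_add_one, List.getElem?_cons_succ, List.eraseIdx_cons_succ]
      rw [tail, ih (fun y r => h y (x :: r)) hndt]
      have hfx : (x :: t).filter (fun y => !(y == x)) = t := by
        have hself : t.filter (fun y => !(y == x)) = t :=
          List.filter_eq_self.mpr (fun a ha => by
            have : a ≠ x := fun he => hx (he ▸ ha)
            simp [this])
        simp [List.filter_cons, hself]
      rw [List.flatMap_cons, hfx]
      congr 1
      apply pv_flatMap_congr_mem
      intro y hy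
      have hne : (x == y) = false := by
        have : x ≠ y := fun he => hx (he ▸ hy)
        simp [this]
      simp [List.filter_cons, hne]

-- the common middle form: digit tuples in A's/B's shared order ------------------

def pvMid (firsts : List String) : List String → List Int → List (List Int)
  | [], _ => [[]]
  | l :: ls, avail =>
      avail.flatMap (fun n =>
        if !(n == 0 && firsts.contains l) then
          (pvMid firsts ls (avail.filter (fun m => !(m == n)))).map (fun ds => n :: ds)
        else [])

theorem pv_mid_nil (firsts : List String) (avail : List Int) :
    pvMid firsts [] avail = [[]] := rfl

theorem pv_mid_cons (firsts : List String) (l : String) (ls : List String) (avail : List Int) :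
    pvMid firsts (l :: ls) avail
      = avail.flatMap (fun n =>
          if !(n == 0 && firsts.contains l) then
            (pvMid firsts ls (avail.filter (fun m => !(m == n)))).map (fun ds => n :: ds)
          else []) := rfl

def pvAvail (forbidden : List Int) : List Int :=
  (PySem.List.pyRange 0 10 1).filter (fun n => !forbidden.contains n)

theorem pv_avail_nodup (forbidden : List Int) : (pvAvail forbidden).Nodup :=
  (PySem.List.nodup_pyRange_one 0 10).filter _

theorem pv_avail_append (forbidden : List Int) (n : Int) :
    pvAvail (forbidden ++ [n]) = (pvAvail forbidden).filter (fun m => !(m == n)) := by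
  unfold pvAvail
  rw [List.filter_filter]
  apply List.filter_congr
  intro m _
  by_cases h1 : m = n <;> by_cases h2 : m ∈ forbidden <;> simp [h1, h2]

-- A's combined filter over range(10) = zero-filter over the available digits
theorem pv_filter_split (forbidden : List Int) (p : Int → Bool) :
    (PySem.List.pyRange 0 10 1).filter (fun n => !forbidden.contains n && p n)
      = (pvAvail forbidden).filter p := by
  unfold pvAvail
  rw [List.filter_filter]
  apply List.filter_congr
  intro m _
  exact Bool.and_comm _ _

-- B's filtered permutations equal pvMid
theorem pv_perm_mid (firsts : List String) :
    ∀ (letters : List String) (avail : List Int), avail.Nodup →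
    (PySem.List.permutations avail letters.length).filter
        (fun ds => !((ds.zip (letters.map (fun l => firsts.contains l))).any
          (fun p => p.1 == 0 && p.2)))
      = pvMid firsts letters avail := by
  intro letters
  induction letters with
  | nil => intro avail _; simp [PySem.List.permutations_zero, pvMid]
  | cons l ls ih =>
      intro avail hnd
      rw [List.length_cons, PySem.List.permutations_succ, pv_filter_flatMap]
      have key := pv_flatMapIdx avail
        (fun y r => ((PySem.List.permutations r ls.length).map (fun p => y :: p)).filter
          (fun ds => !((ds.zip ((l :: ls).map (fun l => firsts.contains l))).any
            (fun p => p.1 == 0 && p.2)))) hnd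
      refine Eq.trans ?_ (key.trans ?_)
      · apply pv_flatMap_congr_mem
        intro i hi
        rw [List.mem_range] at hi
        rw [List.getElem?_eq_getElem hi]
      · rw [pv_mid_cons]
        apply pv_flatMap_congr_mem
        intro x _
        show ((PySem.List.permutations (avail.filter (fun y => !(y == x))) ls.length).map
              (fun p => x :: p)).filter
              (fun ds => !((ds.zip ((l :: ls).map (fun l => firsts.contains l))).any
                (fun p => p.1 == 0 && p.2)))
            = if !(x == 0 && firsts.contains l) then
                (pvMid firsts ls (avail.filter (fun m => !(m == x)))).map (fun ds => x :: ds)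
              else []
        rw [List.filter_map]
        have hcomp : ((fun ds => !((ds.zip ((l :: ls).map (fun l => firsts.contains l))).any
              (fun p => p.1 == 0 && p.2))) ∘ (fun p => x :: p))
            = (fun ds => !(x == 0 && firsts.contains l)
                && !((ds.zip (ls.map (fun l => firsts.contains l))).any
                  (fun p => p.1 == 0 && p.2))) := by
          funext ds
          simp [Function.comp, List.map_cons, List.zip_cons_cons, List.any_cons, Bool.not_or]
        rw [hcomp]
        by_cases hzc : (x == 0 && firsts.contains l) = true
        · obtain ⟨h0, hf⟩ : x = 0 ∧ l ∈ firsts := by simpa using hzc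
          simp [h0, hf]
        · have hzc' : (x == 0 && firsts.contains l) = false := Bool.eq_false_iff.mpr hzc
          simp only [hzc', Bool.not_false, Bool.true_and]
          rw [ih (avail.filter (fun y => !(y == x))) (hnd.filter _)]
          simp [hzc']

-- A's recursion equals pvMid mapped through dict building
theorem pv_rec_mid (firsts : List String) :
    ∀ (rest : List String) (l0 : String) (forbidden : List Int),
    make_associations_rec (l0 :: rest) firsts forbidden
      = (pvMid firsts (l0 :: rest) (pvAvail forbidden)).map
          (fun ds => PySem.Dict.ofList ((l0 :: rest).zip ds)) := by
  intro rest
  induction rest with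
  | nil =>
      intro l0 forbidden
      show ((PySem.List.pyRange 0 10 1).filter _).map _ = _
      rw [pv_filter_split forbidden]
      have hmid : pvMid firsts [l0] (pvAvail forbidden)
          = ((pvAvail forbidden).filter (fun n => !(n == 0 && firsts.contains l0))).map
              (fun n => [n]) := by
        rw [pv_mid_cons]
        rw [show (fun n => if !(n == 0 && firsts.contains l0) then
              (pvMid firsts [] ((pvAvail forbidden).filter (fun m => !(m == n)))).map
                (fun ds => n :: ds)
            else ([] : List (List Int)))
            = (fun n => if !(n == 0 && firsts.contains l0) then [[n]]
                else ([] : List (List Int)))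
          from by
            funext n
            by_cases h0 : n = 0
            · by_cases hf : l0 ∈ firsts
              · simp [h0, hf]
              · simp [h0, hf, pv_mid_nil]
            · simp [h0, pv_mid_nil]]
        rw [pv_flatMap_if_filter, pv_flatMap_single]
      rw [hmid, List.map_map]
      rfl
  | cons l1 rest ih =>
      intro l0 forbidden
      show (PySem.List.pyRange 0 10 1).foldl _ [] = _
      have inner : ∀ (acc : List (PySem.Dict String Int)) (n : Int),
          (make_associations_rec (l1 :: rest) firsts (forbidden ++ [n])).foldl
            (fun enums ele =>
              enums ++ [PySem.Dict.ofList ((PySem.Dict.ofList [(l0, n)]).items ++ ele.items)])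
            acc
          = acc ++ (make_associations_rec (l1 :: rest) firsts (forbidden ++ [n])).map
              (fun ele => PySem.Dict.ofList ((l0, n) :: ele.items)) := by
        intro acc n
        rw [PySem.List.foldl_append_eq_flatMap
          (fun (ele : PySem.Dict String Int) =>
            [PySem.Dict.ofList ((PySem.Dict.ofList [(l0, n)]).items ++ ele.items)]),
          pv_flatMap_single]
        rfl
      refine Eq.trans (pv_foldl_if_append'
        (fun n => !forbidden.contains n && !(n == 0 && firsts.contains l0)) _
        (fun n => (make_associations_rec (l1 :: rest) firsts (forbidden ++ [n])).map
          (fun ele => PySem.Dict.ofList ((l0, n) :: ele.items)))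
        _ _ inner) ?_
      rw [List.nil_append, pv_filter_split forbidden,
        ← pv_flatMap_if_filter (fun n => !(n == 0 && firsts.contains l0)), pv_mid_cons,
        pv_map_flatMap]
      apply pv_flatMap_congr_mem
      intro n _
      by_cases hzc : (n == 0 && firsts.contains l0) = true
      · obtain ⟨h0, hf⟩ : n = 0 ∧ l0 ∈ firsts := by simpa using hzc
        simp [h0, hf]
      · have hzc' : (n == 0 && firsts.contains l0) = false := Bool.eq_false_iff.mpr hzc
        simp only [hzc', Bool.not_false, if_true]
        rw [ih l1 (forbidden ++ [n]), pv_avail_append, List.map_map, List.map_map]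
        apply List.map_congr_left
        intro ds _
        show PySem.Dict.ofList ((l0, n) :: (PySem.Dict.ofList ((l1 :: rest).zip ds)).items)
            = PySem.Dict.ofList ((l0 :: l1 :: rest).zip (n :: ds))
        rw [pv_dict_cons]
        rfl

-- ===== VERDICT (by name: the statement is the Claim_ definition above) =====
theorem make_associations_spec : Claim_equal_make_associations := by
  intro letters firsts forbidden _ hpre
  unfold Spec_make_associations
  obtain ⟨l0, rest, rfl⟩ : ∃ a b, letters = a :: b := by
    cases letters with
    | nil => exact absurd rfl hpre
    | cons a b => exact ⟨a, b, rfl⟩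
  have halt : make_associations_alt (l0 :: rest) firsts forbidden
      = ((PySem.List.permutations (pvAvail forbidden) (l0 :: rest).length).filter
          (fun ds => !((ds.zip ((l0 :: rest).map (fun l => firsts.contains l))).any
            (fun p => p.1 == 0 && p.2)))).map
        (fun ds => (PySem.Dict.ofList ((l0 :: rest).zip ds)).items) := rfl
  show (make_associations_rec (l0 :: rest) firsts forbidden).map (fun d => d.items) = _
  rw [halt, pv_perm_mid firsts (l0 :: rest) (pvAvail forbidden) (pv_avail_nodup forbidden),
    pv_rec_mid firsts rest l0 forbidden, List.map_map]
  rfl
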